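-- pv_equiv track=rewrite | github.com/ntnb24/book-reading-assistant | testing_functionalities.py | correct_diacritics
-- ===== SOURCE A (Python) =====
-- def correct_diacritics(text):
--     # Map the incorrect characters to the correct diacritics
--     corrections = {
--         # Update these mappings based on the actual incorrect sequences you observe
--         '[': 'ă', ']': 'î',  # t with cedilla
--         '{': 'î', '}': 'Î',  # i with circumflex
--         '{': 'î', '}': 'Î',  # i with circumflex
--         '`': 'â',
--         '=': 'ș', '\\': 'ț',
--         "+": "Ș"
--     }
--     for incorrect, correct in corrections.items():
--         text = text.replace(incorrect, correct)
--     return text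
-- ===== SOURCE B (Python) =====
-- def correct_diacritics(text):
--     # Single pass with an explicit if/elif chain, appending pieces to a list
--     # and joining once, instead of eight sequential full-string replace scans.
--     out = []
--     for ch in text:
--         if ch == '[':
--             out.append('ă')
--         elif ch == ']':
--             out.append('î')
--         elif ch == '{':
--             out.append('î')
--         elif ch == '}':
--             out.append('Î')
--         elif ch == '`':
--             out.append('â')
--         elif ch == '=':
--             out.append('ș')
--         elif ch == '\\':
--             out.append('ț')
--         elif ch == '+':
--             out.append('Ș')
--         else:
--             out.append(ch)
--     return ''.join(out)
-- ===== Notes on version B (the rewrite author's own statement) =====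
-- stated objective: simpler
-- what changed: Replaces the eight sequential full-string str.replace passes with one character-by-character loop that appends each (possibly corrected) character via an explicit if/elif chain and joins once; correct because no replacement character is itself a key.
import Mathlib
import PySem

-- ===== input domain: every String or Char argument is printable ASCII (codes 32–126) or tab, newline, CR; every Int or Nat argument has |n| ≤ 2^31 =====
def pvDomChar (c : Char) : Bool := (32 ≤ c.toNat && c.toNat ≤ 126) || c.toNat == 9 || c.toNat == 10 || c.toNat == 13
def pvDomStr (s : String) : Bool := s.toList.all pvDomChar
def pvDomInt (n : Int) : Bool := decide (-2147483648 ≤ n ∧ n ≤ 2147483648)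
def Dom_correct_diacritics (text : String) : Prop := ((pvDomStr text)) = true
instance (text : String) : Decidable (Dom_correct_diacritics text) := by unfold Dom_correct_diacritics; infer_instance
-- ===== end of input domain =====

-- B makes one pass appending each character (corrected by an if/elif chain) and joins once, instead of A's eight sequential replace scans; objective: simpler.

-- ===== PORT A =====
-- the Python dict literal collapses its duplicate '{' and '}' keys in place; items() order is written out
def correct_diacritics (text : String) : String :=
  ([("[", "ă"), ("]", "î"), ("{", "î"), ("}", "Î"), ("`", "â"), ("=", "ș"), ("\\", "ț"), ("+", "Ș")] :
      List (String × String)).foldl (fun t p => PySem.Str.replace t p.1 p.2) text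

-- ===== PORT B =====
-- the if/elif chain of Source B, as one helper
def pvFix (ch : Char) : String :=
  if ch = '[' then "ă"
  else if ch = ']' then "î"
  else if ch = '{' then "î"
  else if ch = '}' then "Î"
  else if ch = '`' then "â"
  else if ch = '=' then "ș"
  else if ch = '\\' then "ț"
  else if ch = '+' then "Ș"
  else String.singleton ch

def correct_diacritics_alt (text : String) : String :=
  PySem.Str.join "" (text.toList.foldl (fun out ch => out ++ [pvFix ch]) [])

-- ===== PRECONDITION & SPEC =====
def Spec_correct_diacritics (text : String) (out : String) : Prop := out = correct_diacritics_alt text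
instance (text : String) (out : String) : Decidable (Spec_correct_diacritics text out) := by unfold Spec_correct_diacritics; infer_instance

-- ===== CLAIM (what is proved, stated in full; the proofs are below) =====
def Claim_equal_correct_diacritics : Prop := ∀ (text : String), Dom_correct_diacritics text → Spec_correct_diacritics text (correct_diacritics text)

-- ===== LEMMAS AND PROOFS =====

-- replace.go with a single-character pattern rewrites each matching character independently
theorem replace_go_single (a : Char) (w : List Char) :
    ∀ (fuel : Nat) (l acc : List Char), l.length ≤ fuel →
      PySem.Chars.replace.go [a] w fuel l acc
        = acc.reverse ++ l.flatMap (fun c => if c = a then w else [c]) := by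
  intro fuel
  induction fuel with
  | zero =>
    intro l acc h
    have : l = [] := List.eq_nil_of_length_eq_zero (Nat.le_zero.mp h)
    subst this
    simp [PySem.Chars.replace.go]
  | succ n ih =>
    intro l acc h
    cases l with
    | nil => simp [PySem.Chars.replace.go]
    | cons c t =>
      have h' : t.length ≤ n := by simpa using Nat.le_of_succ_le_succ h
      simp only [PySem.Chars.replace.go]
      by_cases hc : c = a
      · subst hc
        have hp : List.isPrefixOf [c] (c :: t) = true := by simp [List.isPrefixOf]
        simp [hp, ih t (w.reverse ++ acc) h', List.flatMap_cons]
      · have hp : List.isPrefixOf [a] (c :: t) = false := by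
          simp only [List.isPrefixOf, Bool.and_eq_false_iff]
          left
          exact beq_eq_false_iff_ne.mpr (fun hval => hc hval.symm)
        simp [hp, ih t (c :: acc) h', List.flatMap_cons, hc]

-- a single-char → single-char replace is a map
theorem replace_single (s : List Char) (a b : Char) :
    PySem.Chars.replace s [a] [b] = s.map (fun c => if c = a then b else c) := by
  unfold PySem.Chars.replace
  simp only [List.isEmpty_cons, Bool.false_eq_true, if_false]
  rw [replace_go_single a [b] s.length s [] (le_refl _)]
  simp only [List.reverse_nil, List.nil_append]
  induction s with
  | nil => rfl
  | cons c t ih => by_cases hc : c = a <;> simp [List.flatMap_cons, hc, ih]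

-- the composed eight single-character rewrites, as one character function
def chainF : Char → Char :=
  (fun c => if c = '+' then 'Ș' else c) ∘
    (fun c => if c = '\\' then 'ț' else c) ∘
      (fun c => if c = '=' then 'ș' else c) ∘
        (fun c => if c = '`' then 'â' else c) ∘
          (fun c => if c = '}' then 'Î' else c) ∘
            (fun c => if c = '{' then 'î' else c) ∘
              (fun c => if c = ']' then 'î' else c) ∘ (fun c => if c = '[' then 'ă' else c)

set_option maxHeartbeats 1000000 in
theorem portA_toList (text : String) :
    (correct_diacritics text).toList = text.toList.map chainF := by
  unfold correct_diacritics
  simp only [List.foldl_cons, List.foldl_nil]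
  simp only [PySem.Str.toList_replace]
  simp only [show ("[" : String).toList = ['['] from rfl, show ("]" : String).toList = [']'] from rfl,
             show ("{" : String).toList = ['{'] from rfl, show ("}" : String).toList = ['}'] from rfl,
             show ("`" : String).toList = ['`'] from rfl, show ("=" : String).toList = ['='] from rfl,
             show ("\\" : String).toList = ['\\'] from rfl, show ("+" : String).toList = ['+'] from rfl,
             show ("ă" : String).toList = ['ă'] from rfl, show ("î" : String).toList = ['î'] from rfl,
             show ("Î" : String).toList = ['Î'] from rfl, show ("â" : String).toList = ['â'] from rfl,
             show ("ș" : String).toList = ['ș'] from rfl, show ("ț" : String).toList = ['ț'] from rfl,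
             show ("Ș" : String).toList = ['Ș'] from rfl]
  simp only [replace_single, List.map_map]
  rw [show chainF = ((fun c => if c = '+' then 'Ș' else c) ∘
        (fun c => if c = '\\' then 'ț' else c) ∘
          (fun c => if c = '=' then 'ș' else c) ∘
            (fun c => if c = '`' then 'â' else c) ∘
              (fun c => if c = '}' then 'Î' else c) ∘
                (fun c => if c = '{' then 'î' else c) ∘
                  (fun c => if c = ']' then 'î' else c) ∘ (fun c => if c = '[' then 'ă' else c)) from rfl]

-- B's if/elif chain agrees with the composed chain, character by character
theorem pvFix_toList (c : Char) : (pvFix c).toList = [chainF c] := by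
  by_cases h1 : c = '[' ; · subst h1; decide
  by_cases h2 : c = ']' ; · subst h2; decide
  by_cases h3 : c = '{' ; · subst h3; decide
  by_cases h4 : c = '}' ; · subst h4; decide
  by_cases h5 : c = '`' ; · subst h5; decide
  by_cases h6 : c = '=' ; · subst h6; decide
  by_cases h7 : c = '\\' ; · subst h7; decide
  by_cases h8 : c = '+' ; · subst h8; decide
  simp [pvFix, chainF, h1, h2, h3, h4, h5, h6, h7, h8]

theorem portB_toList (text : String) :
    (correct_diacritics_alt text).toList = text.toList.map chainF := by
  unfold correct_diacritics_alt
  rw [PySem.List.foldl_append_singleton_eq_map]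
  rw [PySem.Str.toList_join]
  simp only [List.nil_append, List.map_map, Function.comp_def, pvFix_toList]
  rw [show (fun c => [chainF c]) = (fun x => [x]) ∘ chainF from rfl, ← List.map_map]
  have : ("" : String).toList = [] := rfl
  rw [this]
  exact PySem.Chars.join_nil_singletons (text.toList.map chainF)

-- ===== VERDICT (by name: the statement is the Claim_ definition above) =====
theorem correct_diacritics_spec : Claim_equal_correct_diacritics := by
  intro text _
  unfold Spec_correct_diacritics
  have h : (correct_diacritics text).toList = (correct_diacritics_alt text).toList :=
    (portA_toList text).trans (portB_toList text).symm
  exact String.ext h
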